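-- pv_equiv track=rewrite | github.com/toby-p/useful-matplotlib | yaxis_tuning.py | strip_trailing_zeroes
-- ===== SOURCE A (Python) =====
-- def strip_trailing_zeroes(s):
--     """Remove trailing zeroes from a string formatted float."""
--     if "." in s:
--         if s[-1:]=="0" or s[-1:]==".":
--             s = s[:-1]
--             return strip_trailing_zeroes(s)
--         else:
--             return s
--     else:
--         return s
-- ===== SOURCE B (Python) =====
-- def strip_trailing_zeroes(s):
--     """Remove trailing zeroes from a string formatted float."""
--     r = len(s)
--     while r > 0 and s[r - 1] in "0.":
--         r -= 1
--     p = s[:r]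
--     if "." in p:
--         return p
--     dot = s.find(".")
--     if dot != -1:
--         return s[:dot]
--     return s
-- ===== Notes on version B (the rewrite author's own statement) =====
-- stated objective: alternative
-- what changed: Replaces A's peel-one-character recursion (which re-scans for the decimal point and re-slices the string at every step) with a single right-to-left scan that finds the cut point, followed by one slice, falling back to cutting at the first decimal point when the trailing run contained every dot.
import Mathlib
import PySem

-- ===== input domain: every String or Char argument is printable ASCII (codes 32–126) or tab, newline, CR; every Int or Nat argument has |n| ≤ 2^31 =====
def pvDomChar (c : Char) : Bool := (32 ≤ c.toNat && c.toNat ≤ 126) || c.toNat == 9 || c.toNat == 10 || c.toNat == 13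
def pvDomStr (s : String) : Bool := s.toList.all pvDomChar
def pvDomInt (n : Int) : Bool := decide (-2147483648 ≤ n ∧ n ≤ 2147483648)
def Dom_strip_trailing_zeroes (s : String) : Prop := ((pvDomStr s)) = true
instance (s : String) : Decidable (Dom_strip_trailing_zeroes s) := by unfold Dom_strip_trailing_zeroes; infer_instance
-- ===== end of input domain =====

-- B replaces A's repeated peel-one-character recursion (each step re-scans for "." and
-- re-slices) by a single right-to-left scan for the cut point plus one decision; same
-- return value on every input.

-- ===== PORT A =====
-- A's recursion on the character list of s; s[:-1] and s[-1:] are PySem slices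
def stzGo (cs : List Char) : List Char :=
  if PySem.Chars.isIn ['.'] cs then
    if PySem.Chars.slice cs (some (-1)) none = ['0'] ∨ PySem.Chars.slice cs (some (-1)) none = ['.'] then
      stzGo (PySem.Chars.slice cs none (some (-1)))
    else cs
  else cs
termination_by cs.length
decreasing_by
  simp only [PySem.Chars.slice_eq_listSlice, PySem.List.slice_to_neg_one,
    PySem.List.slice_from_neg_one] at *
  have hne : cs ≠ [] := by rintro rfl; simp at *
  have := List.length_pos_iff.mpr hne
  simp [List.length_dropLast]; omega

def strip_trailing_zeroes (s : String) : String := String.ofList (stzGo s.toList)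

-- ===== PORT B =====
-- Source B's  'while r > 0 and s[r-1] in "0.": r -= 1'  as recursion on r
def stzRun (cs : List Char) : Nat → Nat
  | 0 => 0
  | r + 1 =>
    match cs[r]? with
    | some c => if c == '0' || c == '.' then stzRun cs r else r + 1
    | none => r + 1   -- never reached from the entry call (there r ≤ len cs throughout)

def stzAltCore (cs : List Char) : List Char :=
  let r := stzRun cs cs.length
  let p := PySem.List.slice cs none (some (r : Int))
  if PySem.Chars.isIn ['.'] p then p
  else
    let dot := PySem.Chars.find cs ['.']
    if dot ≠ -1 then PySem.List.slice cs none (some dot) else cs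

def strip_trailing_zeroes_alt (s : String) : String := String.ofList (stzAltCore s.toList)

-- ===== PRECONDITION & SPEC =====
def Spec_strip_trailing_zeroes (s : String) (out : String) : Prop := out = strip_trailing_zeroes_alt s
instance (s : String) (out : String) : Decidable (Spec_strip_trailing_zeroes s out) := by unfold Spec_strip_trailing_zeroes; infer_instance

-- ===== CLAIM (what is proved, stated in full; the proofs are below) =====
def Claim_equal_strip_trailing_zeroes : Prop := ∀ (s : String), Dom_strip_trailing_zeroes s → Spec_strip_trailing_zeroes s (strip_trailing_zeroes s)

-- ===== LEMMAS AND PROOFS =====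

-- the common closed form: strip the maximal trailing run of '0'/'.'; if that run held
-- every '.', cut instead at the first '.' (if any)
def stzF (c : Char) : Bool := c == '0' || c == '.'

def stzSpec (cs : List Char) : List Char :=
  let p := List.rdropWhile stzF cs
  if '.' ∈ p then p else cs.takeWhile (· != '.')

theorem takeWhile_self_of_not_mem (t : List Char) (h : '.' ∉ t) :
    t.takeWhile (· != '.') = t :=
  List.takeWhile_eq_self_iff.mpr (fun c hc => by simp; rintro rfl; exact h hc)

theorem takeWhile_ne_self_of_mem (t : List Char) (h : '.' ∈ t) :
    t.takeWhile (· != '.') ≠ t := by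
  intro he
  have := List.takeWhile_eq_self_iff.mp he '.' h
  simp at this

-- dropping a trailing '0'/'.' (while a '.' is still present) does not change the closed form
theorem stzSpec_concat (t : List Char) (a : Char) (hf : stzF a = true)
    (hdot : '.' ∈ t ++ [a]) : stzSpec (t ++ [a]) = stzSpec t := by
  unfold stzSpec
  simp only [List.rdropWhile_concat, if_pos hf]
  by_cases hp : '.' ∈ List.rdropWhile stzF t
  · simp [hp]
  · simp only [if_neg hp]
    rw [List.takeWhile_append]
    by_cases hct : '.' ∈ t
    · rw [if_neg]
      intro hlen
      exact takeWhile_ne_self_of_mem t hct ((List.takeWhile_prefix _).eq_of_length hlen)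
    · have ha : a = '.' := by
        rcases List.mem_append.mp hdot with hm | hm
        · exact absurd hm hct
        · exact (List.mem_singleton.mp hm).symm
      have ht : t.takeWhile (· != '.') = t := takeWhile_self_of_not_mem t hct
      rw [if_pos (by rw [ht])]
      simp [ht, ha]

theorem stzRun_append (cs ds : List Char) (r : Nat) (hr : r ≤ cs.length) :
    stzRun (cs ++ ds) r = stzRun cs r := by
  induction r with
  | zero => rfl
  | succ m ih =>
    have hm : m < cs.length := by omega
    simp only [stzRun, List.getElem?_append_left hm]
    cases h : cs[m]? with
    | none => rfl
    | some c => split <;> simp [ih (by omega)]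

-- the while loop lands exactly where rdropWhile cuts
theorem stzRun_eq_rdropWhile (cs : List Char) :
    stzRun cs cs.length = (List.rdropWhile stzF cs).length := by
  induction cs using List.reverseRecOn with
  | nil => rfl
  | append_singleton t a ih =>
    rw [List.rdropWhile_concat]
    have hlen : (t ++ [a]).length = t.length + 1 := by simp
    rw [hlen]
    simp only [stzRun, List.getElem?_append_right (Nat.le_refl t.length), Nat.sub_self,
      List.getElem?_cons_zero]
    by_cases hf : stzF a = true
    · rw [if_pos (by simpa [stzF] using hf), if_pos hf,
        stzRun_append t [a] t.length (Nat.le_refl _), ih]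
    · rw [if_neg (by simpa [stzF] using hf), if_neg hf]; simp

theorem takeWhile_eq_take_of_first {cs : List Char} {n : Nat}
    (hmem : cs[n]? = some '.') (hlt : ∀ i, i < n → ∀ h : i < cs.length, cs[i] ≠ '.') :
    cs.takeWhile (· != '.') = cs.take n := by
  induction cs generalizing n with
  | nil => simp at hmem
  | cons a t ih =>
    cases n with
    | zero => simp_all
    | succ m =>
      have ha : a ≠ '.' := by
        have := hlt 0 (Nat.succ_pos m) (by simp)
        simpa using this
      simp only [List.takeWhile_cons, List.take_succ_cons]
      rw [if_pos (by simp [ha])]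
      rw [ih (by simpa using hmem)]
      intro i hi h
      have := hlt (i + 1) (by omega) (by simpa using Nat.succ_lt_succ h)
      simpa using this

-- B computes the closed form
theorem stzAltCore_eq_spec (cs : List Char) : stzAltCore cs = stzSpec cs := by
  unfold stzAltCore stzSpec
  simp only [stzRun_eq_rdropWhile, PySem.List.slice_to_natCast]
  rw [List.prefix_iff_eq_take.mp (List.rdropWhile_prefix stzF cs) |>.symm]
  by_cases hp : '.' ∈ List.rdropWhile stzF cs
  · rw [if_pos ((PySem.Chars.isIn_iff_infix _ _).mpr ((List.singleton_infix_iff '.' _).mpr hp)),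
      if_pos hp]
  · rw [if_neg (by simp only [(PySem.Chars.isIn_eq_false_iff _ _).mpr
        (fun h => hp ((List.singleton_infix_iff '.' _).mp h))]; simp), if_neg hp]
    by_cases hc : '.' ∈ cs
    · have hnn : 0 ≤ PySem.Chars.find cs ['.'] :=
        (PySem.Chars.find_nonneg_iff cs ['.']).mpr ((List.singleton_infix_iff '.' cs).mpr hc)
      rw [if_pos (by omega)]
      obtain ⟨hpre, hfirst⟩ := PySem.Chars.find_spec hnn
      have hcast : (PySem.Chars.find cs ['.'] : Int) = ((PySem.Chars.find cs ['.']).toNat : Int) := by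
        omega
      rw [hcast, PySem.List.slice_to_natCast]
      refine (takeWhile_eq_take_of_first ?_ ?_).symm
      · rcases hpre with ⟨u, hu⟩
        have h1 := congrArg List.head? hu
        simp only [List.head?_drop, List.cons_append, List.head?_cons] at h1
        exact h1.symm
      · intro i hi h hcontra
        exact hfirst i hi ⟨cs.drop (i + 1), by rw [← hcontra]; exact List.getElem_cons_drop h⟩
    · rw [(PySem.Chars.find_eq_neg_one_iff cs ['.']).mpr
        (fun h => hc ((List.singleton_infix_iff '.' cs).mp h)), if_neg (by simp)]
      exact (takeWhile_self_of_not_mem cs hc).symm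

-- A computes the closed form, by induction from the right following its own recursion
theorem stzGo_eq_spec (cs : List Char) : stzGo cs = stzSpec cs := by
  induction cs using List.reverseRecOn with
  | nil =>
    rw [stzGo, if_neg (by decide)]
    rfl
  | append_singleton t a ih =>
    rw [stzGo]
    simp only [PySem.Chars.slice_eq_listSlice, PySem.List.slice_to_neg_one,
      PySem.List.slice_from_neg_one]
    have hdropA : (t ++ [a]).drop ((t ++ [a]).length - 1) = [a] := by simp
    have hdl : (t ++ [a]).dropLast = t := by simp
    by_cases hdot : '.' ∈ t ++ [a]
    · rw [if_pos ((PySem.Chars.isIn_iff_infix _ _).mpr ((List.singleton_infix_iff '.' _).mpr hdot))]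
      rw [hdropA, hdl]
      by_cases hf : stzF a = true
      · rw [if_pos (by rcases (by simpa [stzF] using hf : a = '0' ∨ a = '.') with h | h <;> simp [h]),
          ih, stzSpec_concat t a hf hdot]
      · rw [if_neg (by rintro (h | h) <;> (injection h with h; exact hf (by simp [stzF, h])))]
        unfold stzSpec
        simp only [List.rdropWhile_concat, if_neg hf]
        rw [if_pos hdot]
    · rw [if_neg (by simp only [(PySem.Chars.isIn_eq_false_iff _ _).mpr
        (fun h => hdot ((List.singleton_infix_iff '.' _).mp h))]; simp)]
      unfold stzSpec
      by_cases hp : '.' ∈ List.rdropWhile stzF (t ++ [a])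
      · exact absurd ((List.rdropWhile_prefix stzF (t ++ [a])).mem hp) hdot
      · rw [if_neg hp, takeWhile_self_of_not_mem _ hdot]

-- ===== VERDICT (by name: the statement is the Claim_ definition above) =====
theorem strip_trailing_zeroes_spec : Claim_equal_strip_trailing_zeroes := by
  intro s _
  unfold Spec_strip_trailing_zeroes strip_trailing_zeroes strip_trailing_zeroes_alt
  rw [stzGo_eq_spec, stzAltCore_eq_spec]
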